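-- pv_equiv track=rewrite | github.com/maciekszul/DevComPsy_dots_exp | exp_util.py | search_n
-- ===== SOURCE A (Python) =====
-- def check_equal(a):
--     """
--     returns boolean if every element in iterable is equal
--     """
--     try:
--         a = iter(a)
--         first = next(a)
--         return all(first == rest for rest in a)
--     except StopIteration:
--         return True
--
-- def search_n(a, n):
--     """
--     search for n repeating numbers
--     a = iterable
--     n = number of repeating elements
--     """
--     check = []
--     carrier = a[n-1:]
--     for index, value in enumerate(carrier):
--         check = check_equal(a[index: index+n])
--         if check:
--             break
--     return check
-- ===== SOURCE B (Python) =====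
-- def search_n(a, n):
--     """
--     search for n repeating numbers
--     a = iterable
--     n = number of repeating elements
--     """
--     run = 0
--     prev = None
--     for x in a:
--         run = run + 1 if x == prev else 1
--         if run >= n:
--             return True
--         prev = x
--     return False
-- ===== Notes on version B (the rewrite author's own statement) =====
-- stated objective: faster
-- what changed: Replaced A's scan over all length-n windows (each re-checked element-by-element via check_equal on a fresh slice) with a single pass that tracks the length of the current run of equal consecutive values and returns as soon as it reaches n. Pre_ excludes only the inputs (empty a, or n > len(a)) where A's loop body never runs and it returns the initial empty list [] instead of a bool.
-- outside the precondition, e.g. on search_n([], 0): A returns [], B returns False; on search_n([1, 2], 5): A returns [], B returns False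
import Mathlib
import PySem

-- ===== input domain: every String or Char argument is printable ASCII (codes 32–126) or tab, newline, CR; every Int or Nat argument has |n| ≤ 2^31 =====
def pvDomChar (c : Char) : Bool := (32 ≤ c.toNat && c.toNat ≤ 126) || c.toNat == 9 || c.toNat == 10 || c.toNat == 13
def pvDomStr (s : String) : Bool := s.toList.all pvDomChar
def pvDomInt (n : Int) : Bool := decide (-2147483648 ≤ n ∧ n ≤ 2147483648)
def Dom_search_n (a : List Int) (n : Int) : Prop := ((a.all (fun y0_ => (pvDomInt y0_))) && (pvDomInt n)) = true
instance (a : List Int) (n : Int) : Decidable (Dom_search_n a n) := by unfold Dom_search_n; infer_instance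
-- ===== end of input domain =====

-- B replaces A's window-by-window scan (a fresh slice checked element-wise per index)
-- with a single pass tracking the current run length of equal consecutive values.


-- ===== PORT A =====
-- check_equal(a): first = next(iter(a)) (StopIteration on [] → True), then all(first == rest)
def check_equal (l : List Int) : Bool :=
  match l with
  | [] => true
  | first :: rest => rest.all (fun r => first == r)

-- 'for index, value in enumerate(carrier): check = check_equal(a[index:index+n]); if check: break'
-- (value is unused by the body; the loop carries the running index and the last 'check')
def searchLoopA (a : List Int) (n : Int) : List Int → Int → Bool → Bool
  | [], _, check => check
  | _ :: rest, index, _ =>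
    let check := check_equal (PySem.List.slice a (some index) (some (index + n)))
    if check then check else searchLoopA a n rest (index + 1) check

def search_n (a : List Int) (n : Int) : Bool :=
  searchLoopA a n (PySem.List.slice a (some (n - 1)) none) 0 false
  -- initial 'check = []' is falsy; when carrier is empty Python returns the non-bool [] — excluded by Pre_

-- ===== PORT B =====
def altLoop (n : Int) : List Int → Int → Option Int → Bool
  | [], _, _ => false
  | x :: rest, run, prev =>
    let run' := if some x == prev then run + 1 else 1
    if run' ≥ n then true else altLoop n rest run' (some x)

def search_n_alt (a : List Int) (n : Int) : Bool :=
  altLoop n a 0 none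

-- ===== PRECONDITION & SPEC =====
-- Pre_ excludes exactly the inputs (a = [] or n > len(a)) on which A's loop never runs and it
-- returns the initial empty LIST [] instead of a bool, i.e. no value of the declared return type.
def Pre_search_n (a : List Int) (n : Int) : Prop := a ≠ [] ∧ n ≤ (a.length : Int)
instance (a : List Int) (n : Int) : Decidable (Pre_search_n a n) := by unfold Pre_search_n; infer_instance

def pvWitness_search_n : List Int × Int := ([3, 7, 7, 2], 2)

def Spec_search_n (a : List Int) (n : Int) (out : Bool) : Prop := out = search_n_alt a n
instance (a : List Int) (n : Int) (out : Bool) : Decidable (Spec_search_n a n out) := by unfold Spec_search_n; infer_instance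

-- ===== CLAIM (what is proved, stated in full; the proofs are below) =====
def Claim_equal_search_n : Prop := ∀ (a : List Int) (n : Int), Dom_search_n a n → Pre_search_n a n → Spec_search_n a n (search_n a n)

-- ===== LEMMAS AND PROOFS =====

-- the body check of A at absolute index j
def chkA (a : List Int) (n j : Int) : Bool :=
  check_equal (PySem.List.slice a (some j) (some (j + n)))

lemma check_equal_true_iff (l : List Int) :
    check_equal l = true ↔ ∃ x, l = List.replicate l.length x := by
  cases l with
  | nil => simp [check_equal]
  | cons f rest =>
    simp only [check_equal, List.all_eq_true, beq_iff_eq]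
    constructor
    · intro h
      refine ⟨f, ?_⟩
      rw [List.eq_replicate_iff]
      refine ⟨rfl, ?_⟩
      intro b hb
      rcases List.mem_cons.mp hb with h1 | h2
      · exact h1
      · exact (h b h2).symm
    · rintro ⟨x, hx⟩
      rw [List.eq_replicate_iff] at hx
      intro r hr
      have h1 : f = x := hx.2 f (List.mem_cons_self ..)
      have h2 : r = x := hx.2 r (List.mem_cons_of_mem _ hr)
      rw [h1, h2]

lemma loopA_true_iff (a : List Int) (n : Int) :
    ∀ (c : List Int) (i : Int),
      searchLoopA a n c i false = true ↔ ∃ k : ℕ, k < c.length ∧ chkA a n (i + k) = true := by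
  intro c
  induction c with
  | nil => intro i; simp [searchLoopA]
  | cons h t ih =>
    intro i
    by_cases hc : check_equal (PySem.List.slice a (some i) (some (i + n))) = true
    · simp only [searchLoopA, hc, if_true]
      refine iff_of_true (by simp) ⟨0, by simp, ?_⟩
      show check_equal (PySem.List.slice a (some (i + (0:ℕ))) (some (i + (0:ℕ) + n))) = true
      simpa using hc
    · simp only [searchLoopA, hc, Bool.false_eq_true, if_false]
      rw [ih (i + 1)]
      constructor
      · rintro ⟨k, hk, hchk⟩
        refine ⟨k + 1, by simpa using Nat.succ_lt_succ hk, ?_⟩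
        have he : i + ((k + 1 : ℕ) : Int) = i + 1 + (k : Int) := by push_cast; ring
        unfold chkA at hchk ⊢
        rw [he]
        exact hchk
      · rintro ⟨k, hk, hchk⟩
        cases k with
        | zero =>
          exfalso
          apply hc
          have : chkA a n (i + ((0:ℕ):Int)) = true := hchk
          simpa [chkA] using this
        | succ k' =>
          refine ⟨k', by simpa using Nat.lt_of_succ_lt_succ (by simpa using hk), ?_⟩
          have he : i + ((k' + 1 : ℕ) : Int) = i + 1 + (k' : Int) := by push_cast; ring
          unfold chkA at hchk ⊢
          rw [he] at hchk
          exact hchk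

lemma infix_cons_shift (n : Int) (hn : 1 ≤ n) (y : Int) (r : List Int) :
    ((∃ j : ℕ, n ≤ 1 + (j : Int) ∧ List.replicate j y <+: r) ∨ ∃ x, List.replicate n.toNat x <:+: r)
      ↔ ∃ x, List.replicate n.toNat x <:+: y :: r := by
  constructor
  · rintro (⟨j, hj, hpre⟩ | ⟨x, hinf⟩)
    · refine ⟨y, ?_⟩
      have h1 : List.replicate (j + 1) y <+: y :: r := by
        rw [List.replicate_succ]
        exact List.cons_prefix_cons.mpr ⟨rfl, hpre⟩
      have h2 : List.replicate n.toNat y <+: List.replicate (j + 1) y := by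
        rw [show j + 1 = n.toNat + (j + 1 - n.toNat) by omega, List.replicate_add]
        exact List.prefix_append _ _
      exact (h2.trans h1).isInfix
    · exact ⟨x, List.infix_cons_iff.mpr (Or.inr hinf)⟩
  · rintro ⟨x, hinf⟩
    rcases List.infix_cons_iff.mp hinf with hpre | hinf'
    · have hm : n.toNat = (n.toNat - 1) + 1 := by omega
      rw [hm, List.replicate_succ] at hpre
      rcases List.cons_prefix_cons.mp hpre with ⟨hxy, htail⟩
      exact Or.inl ⟨n.toNat - 1, by omega, hxy ▸ htail⟩
    · exact Or.inr ⟨x, hinf'⟩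

lemma altLoop_true_iff (n : Int) (hn : 1 ≤ n) :
    ∀ (l : List Int) (run p : Int), 1 ≤ run → run < n →
      (altLoop n l run (some p) = true ↔
        (∃ j : ℕ, n ≤ run + (j : Int) ∧ List.replicate j p <+: l) ∨
          ∃ x, List.replicate n.toNat x <:+: l) := by
  intro l
  induction l with
  | nil =>
    intro run p h1 h2
    simp only [altLoop, Bool.false_eq_true, false_iff]
    rintro (⟨j, hj, hp⟩ | ⟨x, hx⟩)
    · have := hp.length_le
      simp at this
      omega
    · rw [List.infix_nil, List.replicate_eq_nil_iff] at hx
      omega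
  | cons x t ih =>
    intro run p h1 h2
    by_cases hx : x = p
    · subst hx
      simp only [altLoop, beq_self_eq_true, if_true]
      by_cases hge : run + 1 ≥ n
      · rw [if_pos hge]
        refine iff_of_true (by simp) (Or.inl ⟨1, by push_cast; omega, ?_⟩)
        rw [List.replicate_succ, List.replicate_zero]
        exact List.cons_prefix_cons.mpr ⟨rfl, List.nil_prefix⟩
      · rw [if_neg hge, ih (run + 1) x (by omega) (by omega)]
        constructor
        · rintro (⟨j, hj, hp⟩ | ⟨x', hinf⟩)
          · refine Or.inl ⟨j + 1, by push_cast at hj ⊢; omega, ?_⟩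
            rw [List.replicate_succ]
            exact List.cons_prefix_cons.mpr ⟨rfl, hp⟩
          · exact Or.inr ⟨x', List.infix_cons_iff.mpr (Or.inr hinf)⟩
        · rintro (⟨j, hj, hp⟩ | ⟨x', hinf⟩)
          · cases j with
            | zero => exfalso; push_cast at hj; omega
            | succ j' =>
              rw [List.replicate_succ] at hp
              rcases List.cons_prefix_cons.mp hp with ⟨_, ht⟩
              exact Or.inl ⟨j', by push_cast at hj ⊢; omega, ht⟩
          · rcases List.infix_cons_iff.mp hinf with hpre | hinf'
            · have hm : n.toNat = (n.toNat - 1) + 1 := by omega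
              rw [hm, List.replicate_succ] at hpre
              rcases List.cons_prefix_cons.mp hpre with ⟨hxx, ht⟩
              exact Or.inl ⟨n.toNat - 1, by omega, hxx ▸ ht⟩
            · exact Or.inr ⟨x', hinf'⟩
    · have hbeq : (some x == some p) = false := by simp [hx]
      simp only [altLoop, hbeq, Bool.false_eq_true, if_false]
      by_cases hge : (1 : Int) ≥ n
      · rw [if_pos hge]
        have hn1 : n = 1 := by omega
        refine iff_of_true (by simp) (Or.inr ⟨x, ?_⟩)
        rw [hn1]
        show List.replicate 1 x <:+: x :: t
        rw [List.replicate_succ, List.replicate_zero]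
        exact List.infix_cons_iff.mpr (Or.inl (List.cons_prefix_cons.mpr ⟨rfl, List.nil_prefix⟩))
      · rw [if_neg hge, ih 1 x (le_refl 1) (by omega)]
        constructor
        · rintro h
          exact Or.inr ((infix_cons_shift n hn x t).mp h)
        · rintro (⟨j, hj, hp⟩ | ⟨x', hinf⟩)
          · cases j with
            | zero => exfalso; push_cast at hj; omega
            | succ j' =>
              rw [List.replicate_succ] at hp
              rcases List.cons_prefix_cons.mp hp with ⟨hpx, _⟩
              exact absurd hpx.symm hx
          · exact (infix_cons_shift n hn x t).mpr ⟨x', hinf⟩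

lemma alt_true_iff (a : List Int) (n : Int) (hn : 1 ≤ n) :
    search_n_alt a n = true ↔ ∃ x, List.replicate n.toNat x <:+: a := by
  cases a with
  | nil =>
    simp only [search_n_alt, altLoop, Bool.false_eq_true, false_iff]
    rintro ⟨x, hx⟩
    rw [List.infix_nil, List.replicate_eq_nil_iff] at hx
    omega
  | cons y r =>
    have hbeq : (some y == (none : Option Int)) = false := rfl
    simp only [search_n_alt, altLoop, hbeq, Bool.false_eq_true, if_false]
    by_cases hge : (1 : Int) ≥ n
    · rw [if_pos (by omega : (1:Int) ≥ n)]
      have hn1 : n = 1 := by omega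
      refine iff_of_true (by simp) ⟨y, ?_⟩
      rw [hn1]
      show List.replicate 1 y <:+: y :: r
      rw [List.replicate_succ, List.replicate_zero]
      exact List.infix_cons_iff.mpr (Or.inl (List.cons_prefix_cons.mpr ⟨rfl, List.nil_prefix⟩))
    · rw [if_neg (by omega : ¬ ((1:Int) ≥ n)),
        altLoop_true_iff n hn r 1 y (le_refl 1) (by omega)]
      exact infix_cons_shift n hn y r

lemma A_true_iff (a : List Int) (n : Int) (hn : 1 ≤ n) (hle : n ≤ (a.length : Int)) :
    search_n a n = true ↔ ∃ x, List.replicate n.toNat x <:+: a := by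
  have hm1 : 1 ≤ n.toNat := by omega
  have hm2 : n.toNat ≤ a.length := by omega
  have hsl : ∀ k : ℕ, PySem.List.slice a (some (k : Int)) (some ((k : Int) + n)) =
      (a.drop k).take n.toNat := by
    intro k
    rw [PySem.List.slice_toNat a (Int.natCast_nonneg k) (by omega)]
    simp only [Int.toNat_natCast]
    congr 1
    omega
  unfold search_n
  rw [PySem.List.slice_from a (by omega : (0:Int) ≤ n - 1), loopA_true_iff]
  simp only [zero_add, List.length_drop]
  constructor
  · rintro ⟨k, hk, hchk⟩
    unfold chkA at hchk
    rw [hsl k, check_equal_true_iff] at hchk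
    obtain ⟨x, hrep⟩ := hchk
    have hlen : ((a.drop k).take n.toNat).length = n.toNat := by
      simp only [List.length_take, List.length_drop]
      omega
    rw [hlen] at hrep
    exact ⟨x, hrep ▸ ((List.take_prefix n.toNat (a.drop k)).isInfix.trans
      (List.drop_suffix k a).isInfix)⟩
  · rintro ⟨x, hinf⟩
    obtain ⟨s, t, hst⟩ := hinf
    have hlen : a.length = s.length + n.toNat + t.length := by
      rw [← hst]; simp [List.length_append]; omega
    refine ⟨s.length, by omega, ?_⟩
    unfold chkA
    rw [hsl s.length, check_equal_true_iff]
    have hdrop : a.drop s.length = List.replicate n.toNat x ++ t := by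
      rw [← hst, List.append_assoc, List.drop_left]
    rw [hdrop, List.take_left' (by simp)]
    exact ⟨x, by simp⟩

lemma A_nonpos (a : List Int) (n : Int) (hn : n ≤ 0) (ha : a ≠ []) :
    search_n a n = true := by
  have hlen : 0 < a.length := List.length_pos_iff.mpr ha
  unfold search_n
  rw [loopA_true_iff]
  simp only [zero_add]
  have hstart : n - 1 = -(((1 - n).toNat : ℕ) : Int) := by omega
  rw [hstart, PySem.List.slice_from_neg_natCast a (1 - n).toNat (by omega)]
  by_cases hln : (a.length : Int) + n ≤ 0
  · refine ⟨0, ?_, ?_⟩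
    · simp only [List.length_drop]
      omega
    · unfold chkA
      have h0 : ((0:ℕ) : Int) = 0 := rfl
      rw [h0, zero_add]
      have hn' : n = -(((-n).toNat : ℕ) : Int) := by omega
      rw [PySem.List.slice_zero_start, hn',
        PySem.List.slice_to_neg_natCast a (-n).toNat (by omega)]
      have h2 : a.length - (-n).toNat = 0 := by omega
      rw [h2]
      simp [check_equal]
  · refine ⟨(-n).toNat, ?_, ?_⟩
    · simp only [List.length_drop]
      omega
    · unfold chkA
      rw [PySem.List.slice_toNat a (Int.natCast_nonneg _) (by omega)]
      have h3 : ((((-n).toNat : ℕ) : Int) + n).toNat - ((((-n).toNat : ℕ) : Int)).toNat = 0 := by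
        omega
      rw [h3]
      simp [check_equal]

lemma alt_nonpos (a : List Int) (n : Int) (hn : n ≤ 1) (ha : a ≠ []) :
    search_n_alt a n = true := by
  cases a with
  | nil => exact absurd rfl ha
  | cons y r =>
    have hbeq : (some y == (none : Option Int)) = false := rfl
    simp only [search_n_alt, altLoop, hbeq, Bool.false_eq_true, if_false]
    rw [if_pos (by omega : (1:Int) ≥ n)]

-- ===== VERDICT (by name: the statement is the Claim_ definition above) =====
theorem search_n_spec : Claim_equal_search_n := by
  intro a n _ hpre
  obtain ⟨ha, hle⟩ := hpre
  unfold Spec_search_n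
  by_cases hn : 1 ≤ n
  · rw [Bool.eq_iff_iff, A_true_iff a n hn hle, alt_true_iff a n hn]
  · rw [A_nonpos a n (by omega) ha, alt_nonpos a n (by omega) ha]
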